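-- pv_equiv track=rewrite | github.com/lafintiger/ai-horizon-ed-platform | discover/resource_discovery.py | _guess_type_from_url
-- ===== SOURCE A (Python) =====
-- def _guess_type_from_url(url: str) -> str:
--     """Guess resource type from URL"""
--     url_lower = url.lower()
--     if 'youtube.com' in url_lower or 'youtu.be' in url_lower:
--         return 'youtube_video'
--     elif any(platform in url_lower for platform in ['coursera', 'edx', 'udemy']):
--         return 'online_course'
--     elif 'github.com' in url_lower:
--         return 'tool'
--     elif any(term in url_lower for term in ['docs', 'documentation', 'guide']):
--         return 'documentation'
--     else:
--         return 'article'
-- ===== SOURCE B (Python) =====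
-- _KEYWORD_PRIORITY = {
--     'youtube.com': 0, 'youtu.be': 0,
--     'coursera': 1, 'edx': 1, 'udemy': 1,
--     'github.com': 2,
--     'docs': 3, 'documentation': 3, 'guide': 3,
-- }
-- _LABELS = ['youtube_video', 'online_course', 'tool', 'documentation', 'article']
--
-- def _guess_type_from_url(url: str) -> str:
--     """Guess resource type from URL: best (lowest) priority among all matching keywords."""
--     u = url.lower()
--     best = min((p for k, p in _KEYWORD_PRIORITY.items() if k in u), default=len(_LABELS) - 1)
--     return _LABELS[best]
-- ===== Notes on version B (the rewrite author's own statement) =====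
-- stated objective: alternative
-- what changed: Instead of a short-circuit if/elif first-match chain, B evaluates all keywords of a flat keyword-to-priority map, takes the minimum matching priority, and indexes a label table with it.
import Mathlib
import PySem

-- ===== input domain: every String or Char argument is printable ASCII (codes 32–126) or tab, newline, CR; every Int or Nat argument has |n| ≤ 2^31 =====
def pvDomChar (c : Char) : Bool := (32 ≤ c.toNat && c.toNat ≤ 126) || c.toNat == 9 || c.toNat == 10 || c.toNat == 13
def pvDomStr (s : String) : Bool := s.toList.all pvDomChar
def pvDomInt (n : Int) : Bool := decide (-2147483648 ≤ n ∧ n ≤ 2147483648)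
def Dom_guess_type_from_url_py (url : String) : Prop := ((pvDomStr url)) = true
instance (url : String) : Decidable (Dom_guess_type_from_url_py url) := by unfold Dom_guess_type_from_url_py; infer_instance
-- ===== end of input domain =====

-- B replaces A's short-circuit if/elif chain by a min-priority computation over a flat keyword->priority map plus a label-table lookup (alternative decomposition, same cost).


-- ===== PORT A =====
def guess_type_from_url_py (url : String) : String :=
  let url_lower := PySem.Str.lower url
  if PySem.Str.isIn "youtube.com" url_lower || PySem.Str.isIn "youtu.be" url_lower then
    "youtube_video"
  else if (["coursera", "edx", "udemy"].any (fun platform => PySem.Str.isIn platform url_lower)) then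
    "online_course"
  else if PySem.Str.isIn "github.com" url_lower then
    "tool"
  else if (["docs", "documentation", "guide"].any (fun term => PySem.Str.isIn term url_lower)) then
    "documentation"
  else
    "article"

-- ===== PORT B =====
-- flat keyword -> priority map (Python dict _KEYWORD_PRIORITY, insertion order)
def urlKeywordPriority : List (String × Nat) :=
  [("youtube.com", 0), ("youtu.be", 0),
   ("coursera", 1), ("edx", 1), ("udemy", 1),
   ("github.com", 2),
   ("docs", 3), ("documentation", 3), ("guide", 3)]

def urlLabels : List String :=
  ["youtube_video", "online_course", "tool", "documentation", "article"]

-- min over the priorities of all matching keywords, default = len(_LABELS)-1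
def guess_type_from_url_py_alt (url : String) : String :=
  let u := PySem.Str.lower url
  let best := urlKeywordPriority.foldl
    (fun acc kp => if PySem.Str.isIn kp.1 u then min acc kp.2 else acc)
    (urlLabels.length - 1)
  urlLabels.getD best "article"

-- ===== PRECONDITION & SPEC =====
def Spec_guess_type_from_url_py (url : String) (out : String) : Prop := out = guess_type_from_url_py_alt url
instance (url : String) (out : String) : Decidable (Spec_guess_type_from_url_py url out) := by unfold Spec_guess_type_from_url_py; infer_instance

-- ===== CLAIM (what is proved, stated in full; the proofs are below) =====
def Claim_equal_guess_type_from_url_py : Prop := ∀ (url : String), Dom_guess_type_from_url_py url → Spec_guess_type_from_url_py url (guess_type_from_url_py url)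

-- ===== LEMMAS AND PROOFS =====

-- ===== VERDICT (by name: the statement is the Claim_ definition above) =====
theorem guess_type_from_url_py_spec : Claim_equal_guess_type_from_url_py := by
  intro url _
  unfold Spec_guess_type_from_url_py guess_type_from_url_py guess_type_from_url_py_alt
  simp only [urlKeywordPriority, urlLabels, List.foldl, List.any_cons, List.any_nil,
    Bool.or_false, List.length]
  generalize PySem.Str.isIn "youtube.com" (PySem.Str.lower url) = a
  generalize PySem.Str.isIn "youtu.be" (PySem.Str.lower url) = b
  generalize PySem.Str.isIn "coursera" (PySem.Str.lower url) = c
  generalize PySem.Str.isIn "edx" (PySem.Str.lower url) = d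
  generalize PySem.Str.isIn "udemy" (PySem.Str.lower url) = e
  generalize PySem.Str.isIn "github.com" (PySem.Str.lower url) = f
  generalize PySem.Str.isIn "docs" (PySem.Str.lower url) = g
  generalize PySem.Str.isIn "documentation" (PySem.Str.lower url) = h
  generalize PySem.Str.isIn "guide" (PySem.Str.lower url) = i
  revert a b c d e f g h i
  decide
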